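-- pv_equiv track=rewrite | github.com/Sin213/cove-pdf-editor | src/cove_pdf_editor/document.py | _page_in_spec
-- ===== SOURCE A (Python) =====
-- def _page_in_spec(page: int, spec: str) -> bool:
--     """Return True if ``page`` (0-based) is covered by the pages spec."""
--     if spec.strip().lower() == "all":
--         return True
--     for chunk in spec.split(","):
--         chunk = chunk.strip()
--         if not chunk:
--             continue
--         if "-" in chunk:
--             a, b = chunk.split("-", 1)
--             try:
--                 if int(a) - 1 <= page <= int(b) - 1:
--                     return True
--             except ValueError:
--                 continue
--         else:
--             try:
--                 if page == int(chunk) - 1: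
--                     return True
--             except ValueError:
--                 continue
--     return False
-- ===== SOURCE B (Python) =====
-- def _page_in_spec(page: int, spec: str) -> bool:
--     """Parse the spec once into (lo, hi) intervals, sort them by lo, then
--     scan with early exit once lo exceeds page."""
--     if spec.strip().lower() == "all":
--         return True
--     intervals = []
--     for raw in spec.split(","):
--         chunk = raw.strip()
--         if not chunk:
--             continue
--         try:
--             if "-" in chunk:
--                 a, b = chunk.split("-", 1)
--                 lo, hi = int(a) - 1, int(b) - 1
--             else:
--                 lo = int(chunk) - 1
--                 hi = lo
--         except ValueError:
--             continue
--         intervals.append((lo, hi))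
--     intervals.sort(key=lambda t: t[0])
--     for lo, hi in intervals:
--         if page < lo:
--             return False
--         if page <= hi:
--             return True
--     return False
-- ===== Notes on version B (the rewrite author's own statement) =====
-- stated objective: alternative
-- what changed: Instead of testing the page inline against each chunk while parsing with early return, B parses the spec once into a list of (lo,hi) intervals, sorts them by lo, and scans the sorted list with early termination once lo exceeds the page.
import Mathlib
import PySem

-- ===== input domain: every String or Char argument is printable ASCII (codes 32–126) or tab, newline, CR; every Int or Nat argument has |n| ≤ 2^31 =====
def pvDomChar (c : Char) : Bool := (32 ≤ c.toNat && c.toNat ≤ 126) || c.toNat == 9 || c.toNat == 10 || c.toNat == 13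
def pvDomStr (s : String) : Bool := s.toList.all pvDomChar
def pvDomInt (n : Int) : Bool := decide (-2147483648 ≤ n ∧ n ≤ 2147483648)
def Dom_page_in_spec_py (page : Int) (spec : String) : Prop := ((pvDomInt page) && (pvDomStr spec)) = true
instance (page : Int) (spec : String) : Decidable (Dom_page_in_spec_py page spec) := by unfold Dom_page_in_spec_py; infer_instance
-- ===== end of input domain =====

-- B parses the spec once into intervals, sorts and scans; A tests inline per chunk.

-- ===== PORT A =====
-- A's loop over spec.split(","): per chunk, strip, skip empties, test the page
-- directly against the chunk (range or single number), early return on a hit.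
def pvA_loop (page : Int) : List String → Bool
  | [] => false
  | c :: rest =>
    let chunk := PySem.Str.strip c
    if chunk == "" then pvA_loop page rest
    else if PySem.Str.isIn "-" chunk then
      match PySem.Str.splitMax? chunk "-" 1 with
      | some (a :: b :: _) =>
        (match PySem.Int.ofStr? a with
         | some va =>
           if va - 1 ≤ page then
             match PySem.Int.ofStr? b with
             | some vb => if page ≤ vb - 1 then true else pvA_loop page rest
             | none => pvA_loop page rest
           else pvA_loop page rest
         | none => pvA_loop page rest)
      | _ => pvA_loop page rest
    else
      match PySem.Int.ofStr? chunk with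
      | some v => if page == v - 1 then true else pvA_loop page rest
      | none => pvA_loop page rest

def page_in_spec_py (page : Int) (spec : String) : Bool :=
  if PySem.Str.lower (PySem.Str.strip spec) == "all" then true
  else pvA_loop page ((PySem.Str.split? spec ",").getD [])

-- ===== PORT B =====
-- parse one chunk to an interval (none = skipped chunk)
def pvB_parse (raw : String) : Option (Int × Int) :=
  let chunk := PySem.Str.strip raw
  if chunk == "" then none
  else if PySem.Str.isIn "-" chunk then
    match PySem.Str.splitMax? chunk "-" 1 with
    | some (a :: b :: _) =>
      (match PySem.Int.ofStr? a, PySem.Int.ofStr? b with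
       | some va, some vb => some (va - 1, vb - 1)
       | _, _ => none)
    | _ => none
  else
    match PySem.Int.ofStr? chunk with
    | some v => some (v - 1, v - 1)
    | none => none

-- scan the sorted intervals, early exit once lo exceeds page
def pvB_scan (page : Int) : List (Int × Int) → Bool
  | [] => false
  | (lo, hi) :: rest =>
    if page < lo then false
    else if page ≤ hi then true
    else pvB_scan page rest

def page_in_spec_py_alt (page : Int) (spec : String) : Bool :=
  if PySem.Str.lower (PySem.Str.strip spec) == "all" then true
  else
    pvB_scan page
      (PySem.List.sorted (((PySem.Str.split? spec ",").getD []).filterMap pvB_parse) (fun t => t.1))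

-- ===== PRECONDITION & SPEC =====
def Spec_page_in_spec_py (page : Int) (spec : String) (out : Bool) : Prop := out = page_in_spec_py_alt page spec
instance (page : Int) (spec : String) (out : Bool) : Decidable (Spec_page_in_spec_py page spec out) := by unfold Spec_page_in_spec_py; infer_instance

-- ===== CLAIM (what is proved, stated in full; the proofs are below) =====
def Claim_equal_page_in_spec_py : Prop := ∀ (page : Int) (spec : String), Dom_page_in_spec_py page spec → Spec_page_in_spec_py page spec (page_in_spec_py page spec)

-- ===== LEMMAS AND PROOFS =====

-- A's early-return loop computes "some parsed interval covers the page".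
theorem pvA_loop_eq_any (page : Int) (cs : List String) :
    pvA_loop page cs = (cs.filterMap pvB_parse).any (fun t => decide (t.1 ≤ page) && decide (page ≤ t.2)) := by
  induction cs with
  | nil => rfl
  | cons c rest ih =>
    rw [List.filterMap_cons]
    simp only [pvA_loop]
    by_cases h0 : PySem.Str.strip c == ""
    · have hp : pvB_parse c = none := by
        simp only [pvB_parse, h0, if_true]
      simp [h0, hp, ih]
    · simp only [h0]
      by_cases h1 : PySem.Str.isIn "-" (PySem.Str.strip c) = true
      · simp only [h1, if_true]
        cases hsp : PySem.Str.splitMax? (PySem.Str.strip c) "-" 1 with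
        | none =>
          have hp : pvB_parse c = none := by
            simp only [pvB_parse, h0, Bool.false_eq_true, if_false, h1, if_true, hsp]
          simp [hp, ih]
        | some l =>
          match l with
          | [] =>
            have hp : pvB_parse c = none := by
              simp only [pvB_parse, h0, Bool.false_eq_true, if_false, h1, if_true, hsp]
            simp [hp, ih]
          | [a] =>
            have hp : pvB_parse c = none := by
              simp only [pvB_parse, h0, Bool.false_eq_true, if_false, h1, if_true, hsp]
            simp [hp, ih]
          | a :: b :: t =>
            cases ha : PySem.Int.ofStr? a with
            | none =>
              have hp : pvB_parse c = none := by
                simp only [pvB_parse, h0, Bool.false_eq_true, if_false, h1, if_true, hsp, ha]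
              simp [ha, hp, ih]
            | some va =>
              cases hb : PySem.Int.ofStr? b with
              | none =>
                have hp : pvB_parse c = none := by
                  simp only [pvB_parse, h0, Bool.false_eq_true, if_false, h1, if_true, hsp, ha, hb]
                simp only [ha, hb, hp, ih]
                by_cases hle : va - 1 ≤ page <;> simp [hle]
              | some vb =>
                have hp : pvB_parse c = some (va - 1, vb - 1) := by
                  simp only [pvB_parse, h0, Bool.false_eq_true, if_false, h1, if_true, hsp, ha, hb]
                simp only [ha, hb, hp, List.any_cons, ih]
                by_cases hle : va - 1 ≤ page
                · by_cases hle2 : page ≤ vb - 1 <;> simp [hle, hle2]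
                · simp [hle]
      · simp only [h1]
        cases hn : PySem.Int.ofStr? (PySem.Str.strip c) with
        | none =>
          have hp : pvB_parse c = none := by
            simp only [pvB_parse, h0, Bool.false_eq_true, if_false, h1, hn]
          simp [hp, ih]
        | some v =>
          have hp : pvB_parse c = some (v - 1, v - 1) := by
            simp only [pvB_parse, h0, Bool.false_eq_true, if_false, h1, hn]
          simp only [hp, List.any_cons, ih]
          by_cases he : page = v - 1 <;> simp [he]
          omega

-- On a list sorted by lo, the early-exit scan computes the same "any covers".
theorem pvB_scan_eq_any (page : Int) (ys : List (Int × Int))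
    (hs : List.Pairwise (fun a b : Int × Int => a.1 ≤ b.1) ys) :
    pvB_scan page ys = ys.any (fun t => decide (t.1 ≤ page) && decide (page ≤ t.2)) := by
  induction ys with
  | nil => rfl
  | cons y rest ih =>
    obtain ⟨lo, hi⟩ := y
    rcases List.pairwise_cons.mp hs with ⟨hhead, htail⟩
    simp only [pvB_scan, List.any_cons]
    by_cases hlt : page < lo
    · have hrest : rest.any (fun t => decide (t.1 ≤ page) && decide (page ≤ t.2)) = false := by
        rw [List.any_eq_false]
        intro t ht
        have := hhead t ht
        simp only [Bool.and_eq_true, decide_eq_true_eq]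
        omega
      have hfst : (decide (lo ≤ page) && decide (page ≤ hi)) = false := by
        simp only [Bool.and_eq_false_iff, decide_eq_false_iff_not]
        omega
      rw [if_pos hlt, hfst, hrest, Bool.false_or]
    · by_cases hle : page ≤ hi
      · have hfst : (decide (lo ≤ page) && decide (page ≤ hi)) = true := by
          simp only [Bool.and_eq_true, decide_eq_true_eq]
          omega
        rw [if_neg hlt, if_pos hle, hfst, Bool.true_or]
      · have hfst : (decide (lo ≤ page) && decide (page ≤ hi)) = false := by
          simp only [Bool.and_eq_false_iff, decide_eq_false_iff_not]
          omega
        rw [if_neg hlt, if_neg hle, hfst, Bool.false_or, ih htail]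

-- ===== VERDICT (by name: the statement is the Claim_ definition above) =====
theorem page_in_spec_py_spec : Claim_equal_page_in_spec_py := by
  intro page spec _
  unfold Spec_page_in_spec_py page_in_spec_py page_in_spec_py_alt
  by_cases hall : PySem.Str.lower (PySem.Str.strip spec) == "all"
  · simp [hall]
  · simp only [hall]
    rw [pvA_loop_eq_any,
        pvB_scan_eq_any page _ (PySem.List.sorted_pairwise _ _),
        List.Perm.any_eq (PySem.List.sorted_perm _ _ _)]
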